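-- pv_equiv track=rewrite | github.com/surPoudel/JUMP-ptm | pep_xml_parser.py | read_header_pep_xml
-- ===== SOURCE A (Python) =====
-- def read_header_pep_xml(lines_list,pep_xml_dictionary):
--     for index, line in enumerate(lines_list):
--         if '</search_summary>' in line.strip():
--             pep_xml_dictionary["header"].append(line)
--             break
--         else:
--             pep_xml_dictionary["header"].append(line)
--     return index
-- ===== SOURCE B (Python) =====
-- def read_header_pep_xml(lines_list, pep_xml_dictionary):
--     cutoff = None
--     for i, line in enumerate(lines_list):
--         if '</search_summary>' in line.strip():
--             cutoff = i
--             break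
--     index = cutoff if cutoff is not None else len(lines_list) - 1
--     pep_xml_dictionary["header"].extend(lines_list[:index + 1])
--     return index
-- ===== Notes on version B (the rewrite author's own statement) =====
-- stated objective: simpler
-- what changed: B only locates the cutoff index in the loop (no per-line work) and then copies the header lines in one bulk slice extend, instead of A's append-inside-every-branch loop.
-- outside the precondition, e.g. on read_header_pep_xml([], {'header': []}): A raises UnboundLocalError, B returns -1; on read_header_pep_xml(['x'], {}): A raises KeyError, B raises KeyError
import Mathlib
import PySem

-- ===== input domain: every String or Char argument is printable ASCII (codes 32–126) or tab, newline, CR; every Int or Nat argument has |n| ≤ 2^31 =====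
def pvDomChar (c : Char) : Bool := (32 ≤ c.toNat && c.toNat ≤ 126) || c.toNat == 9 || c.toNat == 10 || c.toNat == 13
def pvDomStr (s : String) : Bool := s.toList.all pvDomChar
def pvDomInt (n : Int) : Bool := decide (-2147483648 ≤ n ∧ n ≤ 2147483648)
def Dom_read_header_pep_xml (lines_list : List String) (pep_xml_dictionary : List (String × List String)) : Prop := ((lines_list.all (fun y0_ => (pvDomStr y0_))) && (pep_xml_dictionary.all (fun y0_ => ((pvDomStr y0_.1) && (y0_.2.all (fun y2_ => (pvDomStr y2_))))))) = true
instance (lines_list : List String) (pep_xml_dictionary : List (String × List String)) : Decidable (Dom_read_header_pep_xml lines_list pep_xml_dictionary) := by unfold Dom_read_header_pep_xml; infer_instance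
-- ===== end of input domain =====

-- B replaces A's append-every-line loop by a scan that only finds the cutoff index followed by one
-- bulk slice extend (objective: simpler). Both A and B mutate pep_xml_dictionary["header"] identically
-- in Python; the equivalence proved here is about the RETURN value only.

-- ===== PORT A =====
-- A's for-loop with break: carries the running enumerate index; on fallthrough the loop variable
-- holds the last index, so exhausting the list at index `idx` returns idx - 1.
def pvALoop (lines : List String) (idx : Nat) : Int :=
  match lines with
  | [] => (idx : Int) - 1
  | l :: rest =>
    if PySem.Str.isIn "</search_summary>" (PySem.Str.strip l) then (idx : Int)
    else pvALoop rest (idx + 1)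

def read_header_pep_xml (lines_list : List String) (pep_xml_dictionary : List (String × List String)) : Int :=
  pvALoop lines_list 0

-- ===== PORT B =====
-- B's scan: first matching position as an Option (the appends inside the Python loop are gone);
-- then the returned index is that position, or len - 1 when the sentinel never occurs.
def pvCutoff (lines : List String) : Option Nat :=
  match lines with
  | [] => none
  | l :: rest =>
    if PySem.Str.isIn "</search_summary>" (PySem.Str.strip l) then some 0
    else (pvCutoff rest).map (· + 1)

def read_header_pep_xml_alt (lines_list : List String) (pep_xml_dictionary : List (String × List String)) : Int :=
  match pvCutoff lines_list with
  | some i => (i : Int)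
  | none => (lines_list.length : Int) - 1

-- ===== PRECONDITION & SPEC =====
-- Pre_ excludes the empty list (A's loop variable stays unbound: UnboundLocalError) and dictionaries
-- without a "header" key (KeyError); A raises on both, so never returns there.
def Pre_read_header_pep_xml (lines_list : List String) (pep_xml_dictionary : List (String × List String)) : Prop :=
  lines_list ≠ [] ∧ "header" ∈ pep_xml_dictionary.map Prod.fst
instance (lines_list : List String) (pep_xml_dictionary : List (String × List String)) : Decidable (Pre_read_header_pep_xml lines_list pep_xml_dictionary) := by unfold Pre_read_header_pep_xml; infer_instance

def pvWitness_read_header_pep_xml : List String × (List (String × List String)) :=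
  (["a", "  </search_summary>", "c"], [("header", ["x"])])

def Spec_read_header_pep_xml (lines_list : List String) (pep_xml_dictionary : List (String × List String)) (out : Int) : Prop := out = read_header_pep_xml_alt lines_list pep_xml_dictionary
instance (lines_list : List String) (pep_xml_dictionary : List (String × List String)) (out : Int) : Decidable (Spec_read_header_pep_xml lines_list pep_xml_dictionary out) := by unfold Spec_read_header_pep_xml; infer_instance

-- ===== CLAIM (what is proved, stated in full; the proofs are below) =====
def Claim_equal_read_header_pep_xml : Prop := ∀ (lines_list : List String) (pep_xml_dictionary : List (String × List String)), Dom_read_header_pep_xml lines_list pep_xml_dictionary → Pre_read_header_pep_xml lines_list pep_xml_dictionary → Spec_read_header_pep_xml lines_list pep_xml_dictionary (read_header_pep_xml lines_list pep_xml_dictionary)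

-- ===== LEMMAS AND PROOFS =====
theorem pvALoop_eq (lines : List String) : ∀ idx : Nat,
    pvALoop lines idx = match pvCutoff lines with
      | some i => (idx : Int) + i
      | none => (idx : Int) + lines.length - 1 := by
  induction lines with
  | nil => intro idx; simp [pvALoop, pvCutoff]
  | cons l rest ih =>
    intro idx
    simp only [pvALoop, pvCutoff]
    split_ifs with h
    · simp
    · rw [ih (idx + 1)]
      cases hc : pvCutoff rest with
      | none => simp [List.length_cons]; ring
      | some i => simp; ring

-- ===== VERDICT (by name: the statement is the Claim_ definition above) =====
theorem read_header_pep_xml_spec : Claim_equal_read_header_pep_xml := by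
  intro lines_list pep_xml_dictionary _ _
  unfold Spec_read_header_pep_xml read_header_pep_xml read_header_pep_xml_alt
  rw [pvALoop_eq lines_list 0]
  cases hc : pvCutoff lines_list <;> simp
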